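-- pv_equiv track=rewrite | github.com/volcengine/verl | atropos/environments/intern_bootcamp/internbootcamp_lib/internbootcamp/bootcamp/dshortestandlongestlis/dshortestandlongestlis.py | generate_min_sequence
-- ===== SOURCE A (Python) =====
-- def generate_min_sequence(n, s):
--     b = list(range(n, 0, -1))
--     i = 0
--     while i < n-1:
--         if s[i] == '<':
--             x = 0
--             j = 0
--             while j < (n-1 - i) and s[i + j] == '<':
--                 x += 1
--                 j += 1
--             sub = b[i:i+x+1][::-1]
--             b[i:i+x+1] = sub
--             i += x
--         i += 1
--     return b
-- ===== SOURCE B (Python) =====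
-- def generate_min_sequence(n, s):
--     # One forward pass with a stack: push descending values, flush (reverse) at each block boundary.
--     result = []
--     stack = []
--     for i in range(n):
--         stack.append(n - i)
--         if i == n - 1 or s[i] != '<':
--             while stack:
--                 result.append(stack.pop())
--             stack = []
--     return result
-- ===== Notes on version B (the rewrite author's own statement) =====
-- stated objective: idiomatic
-- what changed: Replaces A's prebuilt descending list mutated by slice-reversal writes with an inner run-counting loop by a single forward pass that pushes descending values on a stack and flushes (reverses) it at each block boundary.
import Mathlib
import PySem

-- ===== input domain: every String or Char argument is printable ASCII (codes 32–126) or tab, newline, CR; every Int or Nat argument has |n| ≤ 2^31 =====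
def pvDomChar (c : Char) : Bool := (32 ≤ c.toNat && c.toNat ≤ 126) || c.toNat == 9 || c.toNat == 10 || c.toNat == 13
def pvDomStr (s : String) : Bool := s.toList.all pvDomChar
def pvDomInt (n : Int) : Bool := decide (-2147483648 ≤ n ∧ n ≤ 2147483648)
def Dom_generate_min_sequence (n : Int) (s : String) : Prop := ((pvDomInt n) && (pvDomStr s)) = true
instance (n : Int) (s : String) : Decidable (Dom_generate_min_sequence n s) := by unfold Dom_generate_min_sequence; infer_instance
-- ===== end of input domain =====

-- B replaces A's slice-reversal writes on a prebuilt descending list by a single stack-flushing pass (idiomatic); same return value on Pre_.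

-- shared helper: Python's s[i]; the '>' default is unreachable under Pre_ (Python raises IndexError there)
def chAt (s : String) (i : Int) : Char := (PySem.Str.pyGet? s i).getD '>'

-- ===== PORT A =====
-- inner while-loop of A (x, j as in A; returns final x); the Nat fuel only makes the loop
-- structurally total: it is called with fuel = (n-1-i-j).toNat, which the loop condition never exceeds
def runAGo (n i : Int) (s : String) (fuel : Nat) (x j : Int) : Int :=
  match fuel with
  | 0 => x
  | fuel' + 1 =>
    if j < n - 1 - i ∧ chAt s (i + j) = '<' then runAGo n i s fuel' (x + 1) (j + 1) else x

def runA (n i : Int) (s : String) (x j : Int) : Int := runAGo n i s (n - 1 - i - j).toNat x j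

-- outer while-loop of A; b[i:i+x+1] = b[i:i+x+1][::-1] ported as b[:i] ++ reversed slice ++ b[i+x+1:]
-- (exact Python slice-assignment semantics for step 1); fuel = (n-1-i).toNat is a totality guard only
def loopAGo (n : Int) (s : String) (fuel : Nat) (b : List Int) (i : Int) : List Int :=
  match fuel with
  | 0 => b
  | fuel' + 1 =>
    if i < n - 1 then
      if chAt s i = '<' then
        let x := runA n i s 0 0
        loopAGo n s fuel'
          (PySem.List.slice b none (some i) ++ (PySem.List.slice b (some i) (some (i + x + 1))).reverse
            ++ PySem.List.slice b (some (i + x + 1)) none)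
          (i + x + 1)
      else loopAGo n s fuel' b (i + 1)
    else b

def generate_min_sequence (n : Int) (s : String) : List Int :=
  loopAGo n s (n - 1).toNat (PySem.List.pyRange n 0 (-1)) 0

-- ===== PORT B =====
-- for-loop of B; `stack` is kept head-first (head = Python's last-appended element), so the
-- pop-until-empty flush `while stack: result.append(stack.pop())` appends `stack` as it stands;
-- fuel = (n-i).toNat is a totality guard only
def loopBGo (n : Int) (s : String) (fuel : Nat) (i : Int) (res stack : List Int) : List Int :=
  match fuel with
  | 0 => res
  | fuel' + 1 =>
    if i < n then
      if i = n - 1 ∨ ¬ chAt s i = '<' then loopBGo n s fuel' (i + 1) (res ++ ((n - i) :: stack)) []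
      else loopBGo n s fuel' (i + 1) res ((n - i) :: stack)
    else res

def generate_min_sequence_alt (n : Int) (s : String) : List Int :=
  loopBGo n s n.toNat 0 [] []

-- ===== PRECONDITION & SPEC =====
-- Pre_ excludes exactly the inputs where Python A raises IndexError: n ≥ 2 with s shorter than n-1
def Pre_generate_min_sequence (n : Int) (s : String) : Prop :=
  n ≤ 1 ∨ n - 1 ≤ (s.toList.length : Int)
instance (n : Int) (s : String) : Decidable (Pre_generate_min_sequence n s) := by
  unfold Pre_generate_min_sequence; infer_instance

def pvWitness_generate_min_sequence : Int × String := (4, "<><")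

def Spec_generate_min_sequence (n : Int) (s : String) (out : List Int) : Prop := out = generate_min_sequence_alt n s
instance (n : Int) (s : String) (out : List Int) : Decidable (Spec_generate_min_sequence n s out) := by unfold Spec_generate_min_sequence; infer_instance

-- ===== CLAIM (what is proved, stated in full; the proofs are below) =====
def Claim_equal_generate_min_sequence : Prop := ∀ (n : Int) (s : String), Dom_generate_min_sequence n s → Pre_generate_min_sequence n s → Spec_generate_min_sequence n s (generate_min_sequence n s)

-- ===== LEMMAS AND PROOFS =====

-- the accumulator x only grows
theorem runAGo_ge (n i : Int) (s : String) :
    ∀ (fuel : Nat) (x j : Int), x ≤ runAGo n i s fuel x j := by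
  intro fuel
  induction fuel with
  | zero => intro x j; simp [runAGo]
  | succ f ih =>
    intro x j
    rw [runAGo]
    split
    · have := ih (x + 1) (j + 1); omega
    · omega

theorem runA_ge (n i : Int) (s : String) (x j : Int) : x ≤ runA n i s x j :=
  runAGo_ge n i s _ x j

-- enough fuel: loopAGo does not depend on the exact fuel
theorem loopAGo_irrel (n : Int) (s : String) :
    ∀ (f1 : Nat) (f2 : Nat) (b : List Int) (i : Int), (n - 1 - i).toNat ≤ f1 →
      (n - 1 - i).toNat ≤ f2 → loopAGo n s f1 b i = loopAGo n s f2 b i := by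
  intro f1
  induction f1 with
  | zero =>
    intro f2 b i h1 h2
    cases f2 with
    | zero => rfl
    | succ f2' => rw [loopAGo, loopAGo, if_neg (by omega)]
  | succ f1' ih =>
    intro f2 b i h1 h2
    cases f2 with
    | zero => rw [loopAGo, loopAGo, if_neg (by omega)]
    | succ f2' =>
      rw [loopAGo, loopAGo]
      by_cases hlt : i < n - 1
      · rw [if_pos hlt, if_pos hlt]
        by_cases hch : chAt s i = '<'
        · rw [if_pos hch, if_pos hch]
          have hx := runA_ge n i s 0 0
          exact ih f2' _ _ (by omega) (by omega)
        · rw [if_neg hch, if_neg hch]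
          exact ih f2' _ _ (by omega) (by omega)
      · rw [if_neg hlt, if_neg hlt]

-- enough fuel: loopBGo does not depend on the exact fuel
theorem loopBGo_irrel (n : Int) (s : String) :
    ∀ (f1 : Nat) (f2 : Nat) (i : Int) (res stack : List Int), (n - i).toNat ≤ f1 →
      (n - i).toNat ≤ f2 → loopBGo n s f1 i res stack = loopBGo n s f2 i res stack := by
  intro f1
  induction f1 with
  | zero =>
    intro f2 i res stack h1 h2
    cases f2 with
    | zero => rfl
    | succ f2' => rw [loopBGo, loopBGo, if_neg (by omega)]
  | succ f1' ih =>
    intro f2 i res stack h1 h2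
    cases f2 with
    | zero => rw [loopBGo, loopBGo, if_neg (by omega)]
    | succ f2' =>
      rw [loopBGo, loopBGo]
      by_cases hlt : i < n
      · rw [if_pos hlt, if_pos hlt]
        by_cases hc : i = n - 1 ∨ ¬ chAt s i = '<'
        · rw [if_pos hc, if_pos hc]
          exact ih f2' _ _ _ (by omega) (by omega)
        · rw [if_neg hc, if_neg hc]
          exact ih f2' _ _ _ (by omega) (by omega)
      · rw [if_neg hlt, if_neg hlt]

-- split a countdown range at any point
theorem pyRange_neg_one_split (a c b : Int) (h1 : b ≤ c) (h2 : c ≤ a) :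
    PySem.List.pyRange a b (-1) = PySem.List.pyRange a c (-1) ++ PySem.List.pyRange c b (-1) := by
  rw [PySem.List.pyRange_neg_one_eq_reverse, PySem.List.pyRange_neg_one_eq_reverse,
    PySem.List.pyRange_neg_one_eq_reverse,
    PySem.List.pyRange_one_append (b + 1) (c + 1) (a + 1) (by omega) (by omega),
    List.reverse_append]

-- what runA computes: a bounded run of '<' characters, maximal unless it hits the bound
theorem runAGo_props (n i : Int) (s : String) :
    ∀ (fuel : Nat) (x j : Int), j ≤ n - 1 - i → n - 1 - i - j ≤ (fuel : Int) →
      runAGo n i s fuel x j ≤ x + (n - 1 - i - j) ∧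
      (∀ t : Int, j ≤ t → t < j + (runAGo n i s fuel x j - x) → chAt s (i + t) = '<') ∧
      (runAGo n i s fuel x j - x < n - 1 - i - j →
        ¬ chAt s (i + (j + (runAGo n i s fuel x j - x))) = '<') := by
  intro fuel
  induction fuel with
  | zero =>
    intro x j hj hf
    simp only [runAGo]
    refine ⟨by omega, by omega, by omega⟩
  | succ f ih =>
    intro x j hj hf
    rw [runAGo]
    by_cases h : j < n - 1 - i ∧ chAt s (i + j) = '<'
    · rw [if_pos h]
      obtain ⟨ih1, ih2, ih3⟩ := ih (x + 1) (j + 1) (by omega) (by push_cast at hf ⊢; omega)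
      refine ⟨by omega, ?_, ?_⟩
      · intro t ht1 ht2
        rcases eq_or_lt_of_le ht1 with rfl | hlt
        · exact h.2
        · exact ih2 t (by omega) (by omega)
      · intro hlt
        have := ih3 (by omega)
        have he : i + (j + 1 + (runAGo n i s f (x + 1) (j + 1) - (x + 1))) =
            i + (j + (runAGo n i s f (x + 1) (j + 1) - x)) := by ring_nf
        rwa [he] at this
    · rw [if_neg h]
      refine ⟨by omega, by omega, ?_⟩
      intro hlt
      simp only [Int.sub_self, Int.add_zero]
      intro hc
      exact h ⟨by omega, hc⟩

theorem runA_props (n i : Int) (s : String) (x j : Int) (hj : j ≤ n - 1 - i) :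
    runA n i s x j ≤ x + (n - 1 - i - j) ∧
    (∀ t : Int, j ≤ t → t < j + (runA n i s x j - x) → chAt s (i + t) = '<') ∧
    (runA n i s x j - x < n - 1 - i - j → ¬ chAt s (i + (j + (runA n i s x j - x))) = '<') :=
  runAGo_props n i s _ x j hj (by omega)

-- B runs through e consecutive '<' positions without flushing, accumulating the stack
theorem loopB_run (n : Int) (s : String) :
    ∀ (e : Nat) (i : Int) (res stack : List Int), i + e ≤ n - 1 →
      (∀ t : Int, 0 ≤ t → t < (e : Int) → chAt s (i + t) = '<') →
      loopBGo n s (n - i).toNat i res stack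
        = loopBGo n s (n - (i + e)).toNat (i + e) res
            (PySem.List.pyRange (n - i - e + 1) (n - i + 1) 1 ++ stack) := by
  intro e
  induction e with
  | zero =>
    intro i res stack hb hc
    simp
  | succ e ih =>
    intro i res stack hb hc
    push_cast at hb
    have hch : chAt s i = '<' := by simpa using hc 0 le_rfl (by push_cast; omega)
    obtain ⟨m, hm⟩ : ∃ m : Nat, (n - i).toNat = m + 1 := ⟨(n - i - 1).toNat, by omega⟩
    rw [hm, loopBGo, if_pos (by omega : i < n), if_neg (by simp [hch]; omega),
      loopBGo_irrel n s m (n - (i + 1)).toNat (i + 1) res ((n - i) :: stack) (by omega) (by omega)]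
    have hc' : ∀ t : Int, 0 ≤ t → t < (e : Int) → chAt s (i + 1 + t) = '<' := by
      intro t ht1 ht2
      have := hc (t + 1) (by omega) (by push_cast; omega)
      rwa [show i + 1 + t = i + (t + 1) by ring]
    rw [ih (i + 1) res ((n - i) :: stack) (by omega) hc']
    have h1 : i + 1 + (e : Int) = i + ((e + 1 : Nat) : Int) := by push_cast; ring
    have key : PySem.List.pyRange (n - (i + 1) - (e : Int) + 1) (n - (i + 1) + 1) 1 ++ ((n - i) :: stack)
        = PySem.List.pyRange (n - i - ((e + 1 : Nat) : Int) + 1) (n - i + 1) 1 ++ stack := by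
      have e1 : n - (i + 1) - (e : Int) + 1 = n - i - e := by ring
      have e2 : n - (i + 1) + 1 = n - i := by ring
      have e3 : n - i - ((e + 1 : Nat) : Int) + 1 = n - i - e := by push_cast; ring
      rw [e1, e2, e3, ← List.singleton_append, ← List.append_assoc,
        ← PySem.List.pyRange_one_succ_right (by omega : n - i - (e : Int) ≤ n - i)]
    rw [h1, key]

-- main invariant: from a flush point i (empty stack), A on res ++ [n-i, …, 1] equals B on (i, res, [])
theorem loop_eq (n : Int) (s : String) :
    ∀ (k : Nat) (i : Int) (res : List Int), (n - i).toNat = k → 0 ≤ i → i ≤ n →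
      (res.length : Int) = i →
      loopAGo n s (n - 1 - i).toNat (res ++ PySem.List.pyRange (n - i) 0 (-1)) i
        = loopBGo n s (n - i).toNat i res [] := by
  intro k
  induction k using Nat.strong_induction_on with
  | _ k IH =>
  intro i res hk h0 hn hlen
  by_cases hlt : i < n - 1
  case neg =>
    have hA : (n - 1 - i).toNat = 0 := by omega
    rw [hA, loopAGo]
    by_cases hin : i = n
    · rw [hin, show (n - n).toNat = 0 by omega, loopBGo,
        PySem.List.pyRange_neg_one_eq_nil (by omega : n - n ≤ 0), List.append_nil]
    · have hi : i = n - 1 := by omega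
      subst hi
      rw [show (n - (n - 1)).toNat = 1 by omega, loopBGo, if_pos (by omega : n - 1 < n),
        if_pos (Or.inl rfl), loopBGo]
      rw [PySem.List.pyRange_neg_one_cons (by omega : (0:Int) < n - (n - 1)),
        PySem.List.pyRange_neg_one_eq_nil (by omega : n - (n - 1) - 1 ≤ 0)]
  case pos =>
    obtain ⟨m, hm⟩ : ∃ m : Nat, (n - 1 - i).toNat = m + 1 := ⟨(n - 2 - i).toNat, by omega⟩
    rw [hm, loopAGo, if_pos hlt]
    by_cases hch : chAt s i = '<'
    · -- '<' run: A reverses the run, B accumulates it on the stack and flushes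
      rw [if_pos hch]
      set x := runA n i s 0 0 with hx
      have hge : (0 : Int) ≤ x := runA_ge n i s 0 0
      obtain ⟨hxb, hrun, hmax⟩ := runA_props n i s 0 0 (by omega)
      rw [← hx] at hxb hrun hmax
      have hidx : i + (0 + (x - 0)) = i + x := by ring
      rw [hidx] at hmax
      have hx1 : 1 ≤ x := by
        by_contra hcon
        have hx0 : x = 0 := by omega
        have := hmax (by omega)
        rw [hx0, add_zero] at this
        exact this hch
      have hxle : x ≤ n - 1 - i := by omega
      set Dh := PySem.List.pyRange (n - i) (n - i - x - 1) (-1) with hDh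
      set Dt := PySem.List.pyRange (n - i - x - 1) 0 (-1) with hDt
      have hsplit : PySem.List.pyRange (n - i) 0 (-1) = Dh ++ Dt :=
        pyRange_neg_one_split _ _ _ (by omega) (by omega)
      have hDhlen : Dh.length = x.toNat + 1 := by
        rw [hDh, PySem.List.length_pyRange_neg_one]; omega
      have hblen : (res ++ Dh).length = (i + x + 1).toNat := by
        rw [List.length_append, hDhlen]; omega
      rw [hsplit, ← List.append_assoc]
      have hsl1 : PySem.List.slice ((res ++ Dh) ++ Dt) none (some i) = res := by
        rw [PySem.List.slice_to _ (by omega : (0:Int) ≤ i), List.append_assoc,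
          show i.toNat = res.length by omega, List.take_left]
      have hsl2 : PySem.List.slice ((res ++ Dh) ++ Dt) (some i) (some (i + x + 1)) = Dh := by
        rw [PySem.List.slice_toNat _ (by omega) (by omega), List.append_assoc,
          show i.toNat = res.length by omega, List.drop_left,
          show (i + x + 1).toNat - res.length = Dh.length by omega, List.take_left]
      have hsl3 : PySem.List.slice ((res ++ Dh) ++ Dt) (some (i + x + 1)) none = Dt := by
        rw [PySem.List.slice_from _ (by omega : (0:Int) ≤ i + x + 1), hblen.symm, List.drop_left]
      simp only [hsl1, hsl2, hsl3]
      have hrev : Dh.reverse = PySem.List.pyRange (n - i - x) (n - i + 1) 1 := by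
        rw [hDh, PySem.List.pyRange_neg_one_eq_reverse, List.reverse_reverse,
          show n - i - x - 1 + 1 = n - i - x by ring]
      rw [hrev]
      have hDt' : Dt = PySem.List.pyRange (n - (i + x + 1)) 0 (-1) := by
        rw [hDt, show n - i - x - 1 = n - (i + x + 1) by ring]
      have hIH := IH (n - (i + x + 1)).toNat (by omega) (i + x + 1)
        (res ++ PySem.List.pyRange (n - i - x) (n - i + 1) 1) rfl (by omega) (by omega)
        (by rw [List.length_append, PySem.List.length_pyRange_one]; push_cast; omega)
      -- B side: run through positions i … i+x-1, then flush at i+x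
      have hB : loopBGo n s (n - i).toNat i res [] = loopBGo n s (n - (i + x)).toNat (i + x) res
          (PySem.List.pyRange (n - i - x + 1) (n - i + 1) 1 ++ ([] : List Int)) := by
        have hcast : ((x.toNat : Int)) = x := Int.toNat_of_nonneg hge
        have := loopB_run n s x.toNat i res [] (by omega)
          (fun t ht1 ht2 => hrun t (by omega) (by omega))
        rwa [hcast] at this
      obtain ⟨m2, hm2⟩ : ∃ m2 : Nat, (n - (i + x)).toNat = m2 + 1 := ⟨(n - i - x - 1).toNat, by omega⟩
      rw [hB, List.append_nil, hm2, loopBGo, if_pos (by omega : i + x < n),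
        if_pos (by
          by_cases hend : x = n - 1 - i
          · exact Or.inl (by omega)
          · exact Or.inr (hmax (by omega)))]
      have hstack : (n - (i + x)) :: PySem.List.pyRange (n - i - x + 1) (n - i + 1) 1
          = PySem.List.pyRange (n - i - x) (n - i + 1) 1 := by
        rw [show n - (i + x) = n - i - x by ring,
          ← PySem.List.pyRange_one_cons (by omega : n - i - x < n - i + 1)]
      rw [hstack, hDt',
        loopAGo_irrel n s m (n - 1 - (i + x + 1)).toNat _ (i + x + 1) (by omega) (by omega),
        loopBGo_irrel n s m2 (n - (i + x + 1)).toNat (i + x + 1) _ [] (by omega) (by omega), hIH]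
    · -- non-'<' boundary: both sides emit n - i and move on
      rw [if_neg hch, PySem.List.pyRange_neg_one_cons (by omega : (0:Int) < n - i)]
      have hIH := IH (n - (i + 1)).toNat (by omega) (i + 1) (res ++ [n - i]) rfl (by omega)
        (by omega) (by rw [List.length_append]; push_cast; simp; omega)
      have hre : res ++ (n - i) :: PySem.List.pyRange (n - i - 1) 0 (-1)
          = (res ++ [n - i]) ++ PySem.List.pyRange (n - (i + 1)) 0 (-1) := by
        rw [List.append_assoc, List.singleton_append, show n - (i + 1) = n - i - 1 by ring]
      obtain ⟨m2, hm2⟩ : ∃ m2 : Nat, (n - i).toNat = m2 + 1 := ⟨(n - i - 1).toNat, by omega⟩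
      rw [hre, hm2, loopBGo, if_pos (by omega : i < n), if_pos (Or.inr hch),
        loopAGo_irrel n s m (n - 1 - (i + 1)).toNat _ (i + 1) (by omega) (by omega),
        loopBGo_irrel n s m2 (n - (i + 1)).toNat (i + 1) _ [] (by omega) (by omega), hIH]

-- ===== VERDICT (by name: the statement is the Claim_ definition above) =====
theorem generate_min_sequence_spec : Claim_equal_generate_min_sequence := by
  unfold Claim_equal_generate_min_sequence
  intro n s _ _
  unfold Spec_generate_min_sequence generate_min_sequence generate_min_sequence_alt
  rcases le_or_gt 0 n with hn | hn
  · have := loop_eq n s (n - 0).toNat 0 [] rfl (by omega) (by omega) (by simp)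
    simpa using this
  · rw [show (n - 1).toNat = 0 by omega, show n.toNat = 0 by omega, loopAGo, loopBGo,
      PySem.List.pyRange_neg_one_eq_nil (by omega : n ≤ 0)]
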